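-- pv_equiv track=rewrite | github.com/koii-network/prometheus-beta | src/longest_subarray.py | find_longest_abs_diff_subarray
-- ===== SOURCE A (Python) =====
-- def find_longest_abs_diff_subarray(A, k):
--     """
--     Find the length of the longest subarray where the absolute difference
--     between adjacent elements is greater than or equal to k.
--
--     Args:
--         A (list): List of integers
--         k (int): Minimum absolute difference between adjacent elements
--
--     Returns:
--         int: Length of the longest valid subarray
--
--     Raises:
--         ValueError: If input is invalid
--     """
--     # Input validation
--     if not isinstance(A, list):
--         raise ValueError("Input must be a list of integers")
--     if not isinstance(k, int):
--         raise ValueError("k must be an integer")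
--
--     # Handle empty or single-element lists
--     if len(A) <= 1:
--         return len(A)
--
--     max_length = 1
--     current_length = 1
--
--     for i in range(1, len(A)):
--         # Find the longest contiguous subarray that meets the condition
--         if abs(A[i] - A[i-1]) >= k:
--             current_length += 1
--         else:
--             # Reset current length when condition is not met
--             current_length = 1
--
--         # Update max_length at each step
--         max_length = max(max_length, current_length)
--
--     return max_length
-- ===== SOURCE B (Python) =====
-- def find_longest_abs_diff_subarray(A, k):
--     """Suffix-run-table reimplementation: precompute, for each position, the
--     length of the run of qualifying adjacent differences starting there, then
--     take the maximum run plus one."""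
--     if not isinstance(A, list):
--         raise ValueError("Input must be a list of integers")
--     if not isinstance(k, int):
--         raise ValueError("k must be an integer")
--     n = len(A)
--     if n <= 1:
--         return n
--     # runs[i] = number of consecutive indices j >= i with abs(A[j+1]-A[j]) >= k
--     runs = [0] * n
--     for i in range(n - 2, -1, -1):
--         runs[i] = runs[i + 1] + 1 if abs(A[i + 1] - A[i]) >= k else 0
--     best = runs[0]
--     for r in runs[1:]:
--         if best < r:
--             best = r
--     return best + 1
-- ===== Notes on version B (the rewrite author's own statement) =====
-- stated objective: alternative
-- what changed: Replaces the online accumulator-and-reset scan (current_length/max_length updated per step) with a two-phase decomposition: a backward-filled suffix-run table runs[i] followed by a max scan, returning max(runs)+1.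
import Mathlib
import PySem

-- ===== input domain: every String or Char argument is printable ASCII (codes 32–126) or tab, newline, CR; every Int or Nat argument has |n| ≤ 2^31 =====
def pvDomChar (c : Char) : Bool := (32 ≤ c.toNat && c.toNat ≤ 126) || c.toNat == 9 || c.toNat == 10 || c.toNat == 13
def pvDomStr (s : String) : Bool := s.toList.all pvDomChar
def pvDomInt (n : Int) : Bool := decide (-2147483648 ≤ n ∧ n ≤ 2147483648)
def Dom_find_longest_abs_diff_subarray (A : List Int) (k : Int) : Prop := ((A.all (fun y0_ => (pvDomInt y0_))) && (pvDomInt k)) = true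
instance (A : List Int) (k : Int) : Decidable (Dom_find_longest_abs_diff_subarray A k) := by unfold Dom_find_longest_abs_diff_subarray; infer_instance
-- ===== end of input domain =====

-- B replaces A's online accumulator-and-reset scan by a two-phase decomposition
-- (a suffix-run table, then a max scan); same O(n) cost, alternative structure.
-- The isinstance‑validation ValueErrors of the Python code are unreachable under
-- the type convention (A : List Int, k : Int), so both ports are total.

-- ===== PORT A =====
def find_longest_abs_diff_subarray (A : List Int) (k : Int) : Int :=
  if PySem.List.len A ≤ 1 then PySem.List.len A
  else
    -- for i in range(1, len(A)) with state (max_length, current_length);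
    -- indices i and i-1 are always in range, so pyGetD's default 0 is never used
    (((PySem.List.pyRange 1 (PySem.List.len A) 1).foldl
      (fun (st : Int × Int) i =>
        let cur : Int :=
          if |PySem.List.pyGetD A i 0 - PySem.List.pyGetD A (i - 1) 0| ≥ k then st.2 + 1 else 1
        (max st.1 cur, cur)) (1, 1)).1)

-- ===== PORT B =====
-- backwards fill of the suffix-run table runs (Source B's downward for-loop),
-- realised as structural recursion from the right end of the list
def pvAltRuns (k : Int) : List Int → List Int
  | [] => []
  | [_] => [0]
  | a :: b :: t =>
    match pvAltRuns k (b :: t) with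
    | [] => []          -- unreachable: pvAltRuns of a nonempty list is nonempty
    | r :: rt => (if |b - a| ≥ k then r + 1 else 0) :: r :: rt

def find_longest_abs_diff_subarray_alt (A : List Int) (k : Int) : Int :=
  if PySem.List.len A ≤ 1 then PySem.List.len A
  else
    match pvAltRuns k A with
    | [] => 0            -- unreachable: the list has at least two elements here
    | r :: rt => rt.foldl (fun best x => if best < x then x else best) r + 1

-- ===== PRECONDITION & SPEC =====
def Spec_find_longest_abs_diff_subarray (A : List Int) (k : Int) (out : Int) : Prop := out = find_longest_abs_diff_subarray_alt A k
instance (A : List Int) (k : Int) (out : Int) : Decidable (Spec_find_longest_abs_diff_subarray A k out) := by unfold Spec_find_longest_abs_diff_subarray; infer_instance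

-- ===== CLAIM (what is proved, stated in full; the proofs are below) =====
def Claim_equal_find_longest_abs_diff_subarray : Prop := ∀ (A : List Int) (k : Int), Dom_find_longest_abs_diff_subarray A k → Spec_find_longest_abs_diff_subarray A k (find_longest_abs_diff_subarray A k)

-- ===== LEMMAS AND PROOFS =====

-- the Booleans of the adjacent-difference tests, in order
def pvDiffs (k : Int) : List Int → List Bool
  | [] => []
  | [_] => []
  | a :: b :: t => decide (|b - a| ≥ k) :: pvDiffs k (b :: t)

-- length of the run of `true`s at the front
def pvFrun : List Bool → Int
  | [] => 0
  | b :: t => if b then pvFrun t + 1 else 0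

-- maximum of pvFrun over all suffixes (0 for the empty one)
def pvSMax : List Bool → Int
  | [] => 0
  | b :: t => max (pvFrun (b :: t)) (pvSMax t)

-- best run value reachable by A's scan when the run crossing the start has length c
def pvBest : List Bool → Int → Int
  | [], c => c
  | b :: t, c => if b then pvBest t (c + 1) else max c (pvBest t 1)

-- A's loop step, on the Boolean of the test
def pvStep : Int × Int → Bool → Int × Int :=
  fun st g => let cur : Int := if g then st.2 + 1 else 1; (max st.1 cur, cur)

theorem pvFrun_nonneg : ∀ l, 0 ≤ pvFrun l := by
  intro l; cases l with
  | nil => simp [pvFrun]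
  | cons b t =>
    by_cases hb : b = true
    · simp only [pvFrun, hb, if_true]; have := pvFrun_nonneg t; omega
    · simp [pvFrun, hb]

theorem pvSMax_nonneg : ∀ l, 0 ≤ pvSMax l := by
  intro l; cases l with
  | nil => simp [pvSMax]
  | cons b t => simp only [pvSMax, le_max_iff]; right; exact pvSMax_nonneg t

theorem pvFrun_le_sMax : ∀ l, pvFrun l ≤ pvSMax l := by
  intro l; cases l with
  | nil => simp [pvFrun, pvSMax]
  | cons b t => simp [pvSMax]

theorem le_pvBest : ∀ l (c : Int), c ≤ pvBest l c := by
  intro l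
  induction l with
  | nil => intro c; simp [pvBest]
  | cons b t ih =>
    intro c
    by_cases hb : b = true
    · simp only [pvBest, hb, if_true]; have := ih (c + 1); omega
    · rw [Bool.not_eq_true] at hb; subst hb
      simp only [pvBest, Bool.false_eq_true, if_false]; exact le_max_left _ _

theorem pvFoldA : ∀ (l : List Bool) (m c : Int), c ≤ m →
    (l.foldl pvStep (m, c)).1 = max m (pvBest l c) := by
  intro l
  induction l with
  | nil => intro m c h; simp [pvBest]; omega
  | cons b t ih =>
    intro m c h
    by_cases hb : b = true
    · have h1 : c + 1 ≤ max m (c + 1) := le_max_right _ _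
      have hi := ih (max m (c + 1)) (c + 1) h1
      have h2 := le_pvBest t (c + 1)
      simp only [List.foldl_cons, pvStep, hb, if_true, pvBest] at hi ⊢
      omega
    · rw [Bool.not_eq_true] at hb; subst hb
      have h1 : (1 : Int) ≤ max m 1 := le_max_right _ _
      have hi := ih (max m 1) 1 h1
      have h2 := le_pvBest t 1
      simp only [List.foldl_cons, pvStep, Bool.false_eq_true, if_false, pvBest] at hi ⊢
      omega

theorem pvBest_eq : ∀ (l : List Bool) (c : Int), 1 ≤ c →
    pvBest l c = max (c + pvFrun l) (1 + pvSMax l) := by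
  intro l
  induction l with
  | nil => intro c h; simp [pvBest, pvFrun, pvSMax]; omega
  | cons b t ih =>
    intro c h
    by_cases hb : b = true
    · have hi := ih (c + 1) (by omega)
      simp only [pvBest, pvFrun, pvSMax, hb, if_true] at hi ⊢
      have h2 := pvFrun_le_sMax t
      omega
    · rw [Bool.not_eq_true] at hb; subst hb
      have hi := ih 1 (by omega)
      simp only [pvBest, pvFrun, pvSMax, Bool.false_eq_true, if_false] at hi ⊢
      have h2 := pvFrun_le_sMax t
      have h3 := pvSMax_nonneg t
      omega

-- Python list indexing of a cons cell at a positive index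
theorem pvShift (x : Int) (xs : List Int) (i : Int) (h : 0 ≤ i) :
    PySem.List.pyGetD (x :: xs) (i + 1) 0 = PySem.List.pyGetD xs i 0 := by
  obtain ⟨n, rfl⟩ := Int.eq_ofNat_of_zero_le h
  rw [show ((n : Int) + 1) = ((n + 1 : Nat) : Int) from by push_cast; ring,
    PySem.List.pyGetD_natCast, PySem.List.pyGetD_natCast]
  simp [List.getD]

-- the index loop of A, read through the zip of the list with its tail
theorem pvIdxFold {σ : Type} (g : σ → Int → Int → σ) :
    ∀ (A : List Int) (st : σ),
    (List.range (A.length - 1)).foldl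
        (fun s (j : Nat) => g s (PySem.List.pyGetD A ((j : Int) + 1) 0) (PySem.List.pyGetD A (j : Int) 0)) st
      = (A.zip A.tail).foldl (fun s p => g s p.2 p.1) st := by
  intro A
  match A with
  | [] => intro st; simp
  | [a] => intro st; simp
  | a :: b :: t =>
    intro st
    have ih := pvIdxFold g (b :: t)
    simp only [List.length_cons, Nat.add_sub_cancel, List.range_succ_eq_map,
      List.foldl_cons, List.foldl_map, List.zip_cons_cons, List.tail_cons]
    have hb2 : (fun (x : σ) (y : Nat) => g x (PySem.List.pyGetD (a :: b :: t) ((y.succ : Int) + 1) 0)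
          (PySem.List.pyGetD (a :: b :: t) ((y.succ : Int)) 0))
        = (fun s (j : Nat) => g s (PySem.List.pyGetD (b :: t) ((j : Int) + 1) 0)
            (PySem.List.pyGetD (b :: t) ((j : Int)) 0)) := by
      funext s j
      have hc : ((j.succ : Nat) : Int) = (j : Int) + 1 := by push_cast [Nat.succ_eq_add_one]; ring
      rw [hc, pvShift a (b :: t) ((j : Int) + 1) (by omega), pvShift a (b :: t) (j : Int) (by omega)]
    have h0 : PySem.List.pyGetD (a :: b :: t) (((0 : Nat) : Int)) 0 = a := by
      rw [PySem.List.pyGetD_natCast]; rfl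
    have h1 : PySem.List.pyGetD (a :: b :: t) (((0 : Nat) : Int) + 1) 0 = b := by
      rw [show ((0 : Nat) : Int) + 1 = ((1 : Nat) : Int) from by norm_num, PySem.List.pyGetD_natCast]; rfl
    rw [hb2, h1, h0]
    simpa using ih (g st b a)
termination_by A => A.length

-- the zip fold of A's tests is a fold over pvDiffs
theorem pvZipDiffs {σ : Type} (k : Int) (h : σ → Bool → σ) :
    ∀ (t : List Int) (a : Int) (st : σ),
    ((a :: t).zip t).foldl (fun s p => h s (decide (|p.2 - p.1| ≥ k))) st
      = (pvDiffs k (a :: t)).foldl h st := by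
  intro t
  induction t with
  | nil => intro a st; simp [pvDiffs]
  | cons b t' ih => intro a st; simp only [List.zip_cons_cons, List.foldl_cons, pvDiffs]; exact ih b _

-- pull the init out of a foldl max
theorem pvFoldlMaxOut : ∀ (rt : List Int) (c r : Int),
    rt.foldl max (max c r) = max c (rt.foldl max r) := by
  intro rt
  induction rt with
  | nil => intro c r; simp
  | cons x rt' ih =>
    intro c r
    simp only [List.foldl_cons]
    rw [show max (max c r) x = max c (max r x) from by omega]
    exact ih c (max r x)

theorem pvIfIsMax : (fun (best x : Int) => if best < x then x else best) = max := by
  funext best x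
  rcases lt_or_ge best x with h | h
  · simp only [if_pos h]; omega
  · simp only [if_neg (not_lt.mpr h)]; omega

-- the suffix-run table: its head is pvFrun of the diffs, its max is pvSMax of the diffs
theorem pvAlt_spec (k : Int) : ∀ (t : List Int) (a : Int),
    ∃ rt, pvAltRuns k (a :: t) = pvFrun (pvDiffs k (a :: t)) :: rt ∧
      rt.foldl max (pvFrun (pvDiffs k (a :: t))) = pvSMax (pvDiffs k (a :: t)) := by
  intro t
  induction t with
  | nil => intro a; exact ⟨[], by simp [pvAltRuns, pvDiffs, pvFrun, pvSMax]⟩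
  | cons b t' ih =>
    intro a
    obtain ⟨rt', hEq, hFold⟩ := ih b
    have hhead : pvFrun (pvDiffs k (a :: b :: t')) =
        if |b - a| ≥ k then pvFrun (pvDiffs k (b :: t')) + 1 else 0 := by
      by_cases hg : |b - a| ≥ k <;> simp [pvDiffs, pvFrun, hg]
    refine ⟨pvFrun (pvDiffs k (b :: t')) :: rt', ?_, ?_⟩
    · simp only [pvAltRuns, hEq, hhead]
    · simp only [List.foldl_cons]
      rw [pvFoldlMaxOut, hFold]
      show _ = pvSMax (decide (|b - a| ≥ k) :: pvDiffs k (b :: t'))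
      simp only [pvSMax]
      rfl

-- ===== VERDICT (by name: the statement is the Claim_ definition above) =====
theorem find_longest_abs_diff_subarray_spec : Claim_equal_find_longest_abs_diff_subarray := by
  intro A k _
  unfold Spec_find_longest_abs_diff_subarray
  unfold find_longest_abs_diff_subarray find_longest_abs_diff_subarray_alt
  by_cases hlen : PySem.List.len A ≤ 1
  · rw [if_pos hlen, if_pos hlen]
  · rw [if_neg hlen, if_neg hlen]
    have hA : ∃ a b t, A = a :: b :: t := by
      match A with
      | [] => exact absurd (by simp [PySem.List.len_eq]) hlen
      | [x] => exact absurd (by simp [PySem.List.len_eq]) hlen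
      | a :: b :: t => exact ⟨a, b, t, rfl⟩
    obtain ⟨a, b, t, rfl⟩ := hA
    -- B side: the table's head and max
    obtain ⟨rt, hEq, hFold⟩ := pvAlt_spec k (b :: t) a
    rw [hEq]
    have hmatch : (match pvFrun (pvDiffs k (a :: b :: t)) :: rt with
        | [] => (0 : Int)
        | r :: rt => rt.foldl (fun best x => if best < x then x else best) r + 1)
        = rt.foldl (fun (best x : Int) => if best < x then x else best)
            (pvFrun (pvDiffs k (a :: b :: t))) + 1 := rfl
    rw [hmatch, pvIfIsMax, hFold]
    -- A side: range fold → Nat-range fold → zip fold → diffs fold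
    rw [show PySem.List.len (a :: b :: t) = (((a :: b :: t).length : Int)) from PySem.List.len_eq _,
        PySem.List.pyRange_one, List.foldl_map]
    have hcast : ((((a :: b :: t).length : Int)) - 1).toNat = (a :: b :: t).length - 1 := by omega
    rw [hcast]
    have hbody : (fun (st : Int × Int) (j : Nat) =>
        (let cur : Int := if |PySem.List.pyGetD (a :: b :: t) (1 + (j : Int)) 0 -
            PySem.List.pyGetD (a :: b :: t) (1 + (j : Int) - 1) 0| ≥ k then st.2 + 1 else 1
         (max st.1 cur, cur)))
        = (fun s (j : Nat) =>
          (fun (s : Int × Int) (x y : Int) => pvStep s (decide (|x - y| ≥ k))) s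
            (PySem.List.pyGetD (a :: b :: t) ((j : Int) + 1) 0)
            (PySem.List.pyGetD (a :: b :: t) ((j : Int)) 0)) := by
      funext st j
      rw [show (1 + (j : Int)) = ((j : Int) + 1) from by ring,
          show ((j : Int) + 1 - 1) = (j : Int) from by ring]
      simp [pvStep]
    rw [hbody, pvIdxFold (fun (s : Int × Int) (x y : Int) => pvStep s (decide (|x - y| ≥ k)))]
    rw [show (a :: b :: t).tail = b :: t from rfl]
    rw [pvZipDiffs k pvStep (b :: t) a]
    rw [pvFoldA _ 1 1 (le_refl 1), pvBest_eq _ 1 (le_refl 1)]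
    have h1 := pvFrun_le_sMax (pvDiffs k (a :: b :: t))
    have h2 := pvSMax_nonneg (pvDiffs k (a :: b :: t))
    omega
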